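-- pv_equiv track=rewrite | github.com/blesscodes/NimGame.py | Nim.py | create_token_counts
-- ===== SOURCE A (Python) =====
-- def create_token_counts(size, token_max):
--     if size <= 0:
--         return []
--     tokenlis = []
--     if size >=1:
--         for i in range(size):
--             tokenlis.append(token_max - i)
--         for i in range(len(tokenlis)):
--             if tokenlis[i]<= 0:
--                 tokenlis[i] = 1
--         return tokenlis
-- ===== SOURCE B (Python) =====
-- def create_token_counts(size, token_max):
--     if size <= 0:
--         return []
--     count = max(0, min(size, token_max))
--     return list(range(token_max, token_max - count, -1)) + [1] * (size - count)
-- ===== Notes on version B (the rewrite author's own statement) =====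
-- stated objective: alternative
-- what changed: Replaces the build-then-clamp two-pass scan with a closed-form construction: compute the cutoff count = max(0, min(size, token_max)), emit the strictly decreasing prefix as one range and append [1]*(size-count) for the clamped tail.
import Mathlib
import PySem

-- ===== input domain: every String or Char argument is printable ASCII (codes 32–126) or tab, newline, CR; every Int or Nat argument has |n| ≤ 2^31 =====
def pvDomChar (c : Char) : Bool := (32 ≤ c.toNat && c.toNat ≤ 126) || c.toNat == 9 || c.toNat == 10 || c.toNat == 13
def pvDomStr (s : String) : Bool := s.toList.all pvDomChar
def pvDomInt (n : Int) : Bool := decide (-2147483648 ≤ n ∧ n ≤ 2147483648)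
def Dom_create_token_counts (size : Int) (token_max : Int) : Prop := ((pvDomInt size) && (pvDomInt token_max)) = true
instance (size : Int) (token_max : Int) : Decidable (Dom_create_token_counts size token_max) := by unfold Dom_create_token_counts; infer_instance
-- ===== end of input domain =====

-- B replaces A's build-then-clamp element scan with a closed-form prefix range plus a replicated tail of 1s (alternative decomposition, same cost).


-- ===== PORT A =====
-- first loop: append token_max - i for i in range(size); second loop: each element ≤ 0 is overwritten by 1
-- (the Python index-assignment loop touches every position once, ported as the elementwise rewrite over the same list)
def create_token_counts (size : Int) (token_max : Int) : List Int :=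
  if size ≤ 0 then []
  else
    let tokenlis := (PySem.List.pyRange 0 size 1).foldl (fun acc i => acc ++ [token_max - i]) []
    tokenlis.map (fun x => if x ≤ 0 then 1 else x)

-- ===== PORT B =====
def create_token_counts_alt (size : Int) (token_max : Int) : List Int :=
  if size ≤ 0 then []
  else
    let count := max 0 (min size token_max)
    PySem.List.pyRange token_max (token_max - count) (-1) ++ List.replicate (size - count).toNat 1

-- ===== PRECONDITION & SPEC =====
def Spec_create_token_counts (size : Int) (token_max : Int) (out : List Int) : Prop := out = create_token_counts_alt size token_max
instance (size : Int) (token_max : Int) (out : List Int) : Decidable (Spec_create_token_counts size token_max out) := by unfold Spec_create_token_counts; infer_instance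

-- ===== CLAIM (what is proved, stated in full; the proofs are below) =====
def Claim_equal_create_token_counts : Prop := ∀ (size : Int) (token_max : Int), Dom_create_token_counts size token_max → Spec_create_token_counts size token_max (create_token_counts size token_max)

-- ===== LEMMAS AND PROOFS =====

-- A's body, for 0 < size, is the clamp mapped over range size
theorem pv_A_char (size token_max : Int) (h : ¬ size ≤ 0) :
    create_token_counts size token_max =
      (List.range size.toNat).map (fun (k : Nat) => if token_max - (k : Int) ≤ 0 then (1 : Int) else token_max - (k : Int)) := by
  simp only [create_token_counts, if_neg h, PySem.List.foldl_append_singleton_eq_map,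
    PySem.List.pyRange_one, List.nil_append, List.map_map, sub_zero]
  refine List.map_congr_left fun k _ => ?_
  simp only [Function.comp_apply, zero_add]

-- B's body, for 0 < size, split into the two range pieces
theorem pv_B_char (size token_max : Int) (h : ¬ size ≤ 0) :
    create_token_counts_alt size token_max =
      (List.range (max 0 (min size token_max)).toNat).map (fun (k : Nat) => token_max - (k : Int)) ++
        List.replicate (size - max 0 (min size token_max)).toNat 1 := by
  have he : (token_max - (token_max - max 0 (min size token_max))).toNat
      = (max 0 (min size token_max)).toNat := by omega
  simp only [create_token_counts_alt, if_neg h, PySem.List.pyRange_neg_one, he]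

theorem create_token_counts_spec_aux (size token_max : Int) :
    create_token_counts size token_max = create_token_counts_alt size token_max := by
  by_cases h : size ≤ 0
  · simp [create_token_counts, create_token_counts_alt, h]
  · rw [pv_A_char size token_max h, pv_B_char size token_max h]
    set c : Nat := (max 0 (min size token_max)).toNat with hc
    have hcle : c ≤ size.toNat := by omega
    have hsplit : size.toNat = c + (size.toNat - c) := by omega
    rw [hsplit, List.range_add, List.map_append, List.map_map]
    refine congrArg₂ _ ?_ ?_
    · refine List.map_congr_left (fun k hk => ?_)
      rw [List.mem_range] at hk
      have hgt : ¬ token_max - (k : Int) ≤ 0 := by omega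
      simp [hgt]
    · have hrep : (size - max 0 (min size token_max)).toNat = size.toNat - c := by omega
      rw [hrep]
      refine List.eq_replicate_iff.mpr ⟨by simp, fun b hb => ?_⟩
      simp only [List.mem_map, List.mem_range, Function.comp_apply] at hb
      obtain ⟨k, hk, hbk⟩ := hb
      rw [← hbk, if_pos (by push_cast; omega)]

-- ===== VERDICT (by name: the statement is the Claim_ definition above) =====
theorem create_token_counts_spec : Claim_equal_create_token_counts := by
  intro size token_max _
  exact create_token_counts_spec_aux size token_max
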